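-- pv_equiv track=rewrite | github.com/jpmarceaux/QuantumHardwareSubgroup | lib/lib/color_compass.py | bacon_shor_group
-- ===== SOURCE A (Python) =====
-- def bacon_shor_group(dimX, dimZ):
--     """
--     return the BS code stabilizers
--     """
--     Xs = []
--     Zs = []
--     for i in range(dimZ-1):
--         s = list('_'*dimZ*dimX)
--         for j in range(dimX):
--             s[j*dimZ+i] = 'Z'
--             s[j*dimZ+i+1] = 'Z'
--         Zs.append(''.join(s))
--     for i in range(dimX-1):
--         s = list('_'*dimX*dimZ)
--         for j in range(dimZ):
--             s[j+i*dimZ] = 'X'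
--             s[j+(i+1)*dimZ] = 'X'
--         Xs.append(''.join(s))
--     return [Xs, Zs]
-- ===== SOURCE B (Python) =====
-- def bacon_shor_group(dimX, dimZ):
--     """
--     return the BS code stabilizers
--     """
--     Zs = [('_' * i + 'ZZ' + '_' * (dimZ - i - 2)) * dimX for i in range(dimZ - 1)]
--     Xs = ['_' * (dimZ * i) + 'X' * (2 * dimZ) + '_' * (dimZ * (dimX - i - 2)) for i in range(dimX - 1)]
--     return [Xs, Zs]
-- ===== Notes on version B (the rewrite author's own statement) =====
-- stated objective: simpler
-- what changed: Each stabilizer row is built as a closed-form string (block repetition/concatenation of '_' runs and the ZZ / X-block patterns) instead of allocating an underscore list and mutating it index by index in an inner loop, which disappears entirely.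
import Mathlib
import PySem

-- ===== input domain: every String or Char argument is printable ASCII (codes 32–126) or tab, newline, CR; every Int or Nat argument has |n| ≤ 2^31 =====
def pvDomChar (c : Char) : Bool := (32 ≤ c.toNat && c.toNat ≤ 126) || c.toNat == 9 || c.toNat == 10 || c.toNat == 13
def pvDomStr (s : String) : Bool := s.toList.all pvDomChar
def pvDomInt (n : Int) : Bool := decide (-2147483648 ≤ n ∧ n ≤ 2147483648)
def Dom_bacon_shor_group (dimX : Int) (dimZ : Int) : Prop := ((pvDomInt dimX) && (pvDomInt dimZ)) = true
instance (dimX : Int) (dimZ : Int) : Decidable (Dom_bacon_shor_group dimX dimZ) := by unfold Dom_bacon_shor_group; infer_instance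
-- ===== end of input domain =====

-- B builds each stabilizer row as a closed-form concatenation of blocks instead of A's
-- index-by-index mutation of an underscore list (objective: simpler; return value only).

-- ===== PORT A =====
def bacon_shor_group (dimX : Int) (dimZ : Int) : List (List String) :=
  -- for i in range(dimZ-1): s = list('_'*dimZ*dimX); for j in range(dimX): s[j*dimZ+i]='Z'; s[j*dimZ+i+1]='Z'; Zs.append(''.join(s))
  let Zs := (PySem.List.pyRange 0 (dimZ - 1) 1).foldl (fun Zs i =>
    let s0 := PySem.List.pyRepeat (List.replicate dimZ.toNat '_') dimX
    let s := (PySem.List.pyRange 0 dimX 1).foldl (fun s j =>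
      PySem.List.pySetD (PySem.List.pySetD s (j * dimZ + i) 'Z') (j * dimZ + i + 1) 'Z') s0
    Zs ++ [String.ofList s]) []
  -- for i in range(dimX-1): s = list('_'*dimX*dimZ); for j in range(dimZ): s[j+i*dimZ]='X'; s[j+(i+1)*dimZ]='X'; Xs.append(''.join(s))
  let Xs := (PySem.List.pyRange 0 (dimX - 1) 1).foldl (fun Xs i =>
    let s0 := PySem.List.pyRepeat (List.replicate dimX.toNat '_') dimZ
    let s := (PySem.List.pyRange 0 dimZ 1).foldl (fun s j =>
      PySem.List.pySetD (PySem.List.pySetD s (j + i * dimZ) 'X') (j + (i + 1) * dimZ) 'X') s0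
    Xs ++ [String.ofList s]) []
  [Xs, Zs]

-- ===== PORT B =====
def bacon_shor_group_alt (dimX : Int) (dimZ : Int) : List (List String) :=
  -- Zs = [('_'*i + 'ZZ' + '_'*(dimZ-i-2)) * dimX for i in range(dimZ-1)]
  let Zs := (PySem.List.pyRange 0 (dimZ - 1) 1).map (fun i =>
    String.ofList (PySem.List.pyRepeat
      (List.replicate i.toNat '_' ++ ['Z', 'Z'] ++ List.replicate (dimZ - i - 2).toNat '_') dimX))
  -- Xs = ['_'*(dimZ*i) + 'X'*(2*dimZ) + '_'*(dimZ*(dimX-i-2)) for i in range(dimX-1)]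
  let Xs := (PySem.List.pyRange 0 (dimX - 1) 1).map (fun i =>
    String.ofList (List.replicate (dimZ * i).toNat '_' ++ List.replicate (2 * dimZ).toNat 'X'
      ++ List.replicate (dimZ * (dimX - i - 2)).toNat '_'))
  [Xs, Zs]

-- ===== PRECONDITION & SPEC =====
def Spec_bacon_shor_group (dimX : Int) (dimZ : Int) (out : List (List String)) : Prop := out = bacon_shor_group_alt dimX dimZ
instance (dimX : Int) (dimZ : Int) (out : List (List String)) : Decidable (Spec_bacon_shor_group dimX dimZ out) := by unfold Spec_bacon_shor_group; infer_instance

-- ===== CLAIM (what is proved, stated in full; the proofs are below) =====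
def Claim_equal_bacon_shor_group : Prop := ∀ (dimX : Int) (dimZ : Int), Dom_bacon_shor_group dimX dimZ → Spec_bacon_shor_group dimX dimZ (bacon_shor_group dimX dimZ)

-- ===== LEMMAS AND PROOFS =====

theorem pv_toNat_mul (a b : Int) (hb : 0 ≤ b) : (a * b).toNat = a.toNat * b.toNat := by
  rcases le_or_gt a 0 with h | h
  · have h1 : a * b ≤ 0 := mul_nonpos_of_nonpos_of_nonneg h hb
    simp [Int.toNat_eq_zero.mpr h1, Int.toNat_eq_zero.mpr h]
  · lift a to Nat using le_of_lt h
    lift b to Nat using hb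
    rw [← Nat.cast_mul, Int.toNat_natCast, Int.toNat_natCast, Int.toNat_natCast]

theorem pv_length_flatten_replicate {α : Type} (m : Nat) (l : List α) :
    (List.replicate m l).flatten.length = m * l.length := by
  induction m with
  | zero => simp
  | succ k ih => simp [List.replicate_succ, ih, Nat.succ_mul, Nat.add_comm]

theorem pv_set_replicate {α : Type} (a v : α) (i k : Nat) (h : i < k) :
    (List.replicate k a).set i v = List.replicate i a ++ v :: List.replicate (k - i - 1) a := by
  induction i generalizing k with
  | zero =>
    cases k with
    | zero => omega
    | succ k' => simp [List.replicate_succ]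
  | succ i' ih =>
    cases k with
    | zero => omega
    | succ k' =>
      simp only [List.replicate_succ, List.set_cons_succ, ih k' (by omega)]
      simp

theorem pv_zloop (n ii : Nat) (h : ii + 2 ≤ n) (m M : Nat) (hm : m ≤ M) :
    (List.range m).foldl (fun s k => ((s.set (k * n + ii) 'Z').set (k * n + ii + 1) 'Z'))
      (List.replicate (M * n) '_')
    = (List.replicate m (List.replicate ii '_' ++ 'Z' :: 'Z' :: List.replicate (n - ii - 2) '_')).flatten
        ++ List.replicate ((M - m) * n) '_' := by
  induction m with
  | zero => simp
  | succ k ih =>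
    rw [List.range_succ, List.foldl_append, ih (by omega)]
    simp only [List.foldl_cons, List.foldl_nil]
    set blk : List Char := List.replicate ii '_' ++ 'Z' :: 'Z' :: List.replicate (n - ii - 2) '_' with hblk
    set F : List Char := (List.replicate k blk).flatten with hFdef
    have hb : blk.length = n := by simp [hblk]; omega
    have hF : F.length = k * n := by rw [hFdef, pv_length_flatten_replicate, hb]
    set K : Nat := (M - k) * n with hKdef
    have hsplit : (M - k) * n = n + (M - k - 1) * n := by
      obtain ⟨t, ht⟩ : ∃ t, M - k = t + 1 := ⟨M - k - 1, by omega⟩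
      rw [ht]
      simp [Nat.succ_mul, Nat.add_comm]
    have hK : n ≤ K := by omega
    rw [List.set_append_right _ _ (by omega)]
    have h1 : k * n + ii - F.length = ii := by omega
    rw [h1]
    rw [List.set_append_right _ _ (by omega)]
    have h2 : k * n + ii + 1 - F.length = ii + 1 := by omega
    rw [h2]
    rw [pv_set_replicate _ _ _ _ (by omega)]
    rw [List.set_append_right _ _ (by simp)]
    have h3 : ii + 1 - (List.replicate ii '_').length = 1 := by simp
    rw [h3]
    rw [List.set_cons_succ, pv_set_replicate _ _ _ _ (by omega)]
    rw [List.replicate_succ', List.flatten_append]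
    have h4 : ([blk] : List (List Char)).flatten = blk := by simp
    rw [h4, ← hFdef, List.append_assoc]
    congr 1
    rw [hblk]
    have h5 : K - ii - 1 - 0 - 1 = (n - ii - 2) + (M - k - 1) * n := by omega
    rw [h5, List.replicate_add]
    simp
    omega

theorem pv_gap (g : Nat) (t : List Char) :
    (List.replicate (g + 1) '_' ++ t).set 0 'X' = 'X' :: (List.replicate g '_' ++ t) := by
  simp [List.replicate_succ]

theorem pv_merge (j : Nat) (t : List Char) :
    List.replicate j 'X' ++ 'X' :: t = List.replicate (j + 1) 'X' ++ t := by
  rw [List.replicate_succ', List.append_assoc]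
  rfl

theorem pv_xloop (P S : List Char) (n : Nat) (j : Nat) (hj : j ≤ n) :
    (List.range j).foldl
      (fun s k => (s.set (k + P.length) 'X').set (k + (P.length + n)) 'X')
      (P ++ (List.replicate n '_' ++ (List.replicate n '_' ++ S)))
    = P ++ (List.replicate j 'X' ++ (List.replicate (n - j) '_' ++
        (List.replicate j 'X' ++ (List.replicate (n - j) '_' ++ S)))) := by
  induction j with
  | zero => simp
  | succ j ih =>
    rw [List.range_succ, List.foldl_append, ih (by omega)]
    simp only [List.foldl_cons, List.foldl_nil]
    obtain ⟨g, hg⟩ : ∃ g, n - j = g + 1 := ⟨n - j - 1, by omega⟩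
    have hg' : n - (j + 1) = g := by omega
    rw [hg, hg']
    -- push both sets past P
    rw [List.set_append_right _ _ (by omega)]
    have e1 : j + P.length - P.length = j := by omega
    rw [e1]
    rw [List.set_append_right _ _ (by omega)]
    have e3 : j + (P.length + n) - P.length = j + n := by omega
    rw [e3]
    -- first set: skip the first X block, hit the head of the first gap
    rw [List.set_append_right _ _ (by simp)]
    have e2 : j - (List.replicate j 'X').length = 0 := by simp
    rw [e2]
    rw [pv_gap]
    rw [pv_merge]
    -- second set: skip first block and gap and second block, hit the head of the second gap
    rw [List.set_append_right _ _ (by simp; omega)]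
    have e4 : j + n - (List.replicate (j + 1) 'X').length = g + j := by simp; omega
    rw [e4]
    rw [List.set_append_right _ _ (by simp)]
    have e5 : g + j - (List.replicate g '_').length = j := by simp
    rw [e5]
    rw [List.set_append_right _ _ (by simp)]
    have e6 : j - (List.replicate j 'X').length = 0 := by simp
    rw [e6]
    rw [pv_gap]
    rw [pv_merge]

theorem pv_rep_rep {α : Type} (m n : Nat) (a : α) :
    (List.replicate m (List.replicate n a)).flatten = List.replicate (m * n) a := by
  induction m with
  | zero => simp
  | succ k ih =>
    rw [List.replicate_succ, List.flatten_cons, ih, ← List.replicate_add]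
    congr 1
    ring

theorem pv_zrow (dimX dimZ i : Int) (h0 : 0 ≤ i) (h1 : i < dimZ - 1) :
    (PySem.List.pyRange 0 dimX 1).foldl
      (fun s j => PySem.List.pySetD (PySem.List.pySetD s (j * dimZ + i) 'Z') (j * dimZ + i + 1) 'Z')
      (PySem.List.pyRepeat (List.replicate dimZ.toNat '_') dimX)
    = PySem.List.pyRepeat
        (List.replicate i.toNat '_' ++ ['Z', 'Z'] ++ List.replicate (dimZ - i - 2).toNat '_') dimX := by
  set n := dimZ.toNat with hn
  set ii := i.toNat with hii
  set m := dimX.toNat with hm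
  have hdz : dimZ = (n : Int) := by omega
  have hi : i = (ii : Int) := by omega
  have h : ii + 2 ≤ n := by omega
  rw [PySem.List.pyRange_one]
  have hr : (dimX - 0).toNat = m := by omega
  rw [hr, List.foldl_map]
  have hinit : PySem.List.pyRepeat (List.replicate n '_') dimX = List.replicate (m * n) '_' := by
    rw [show PySem.List.pyRepeat (List.replicate n '_') dimX
          = (List.replicate m (List.replicate n '_')).flatten from rfl, pv_rep_rep]
  rw [hinit]
  have hstep : (fun (s : List Char) (k : Nat) =>
        PySem.List.pySetD (PySem.List.pySetD s ((0 + (k : Int)) * dimZ + i) 'Z') ((0 + (k : Int)) * dimZ + i + 1) 'Z')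
      = (fun (s : List Char) (k : Nat) => (s.set (k * n + ii) 'Z').set (k * n + ii + 1) 'Z') := by
    funext s k
    have c1 : (0 + (k : Int)) * dimZ + i = ((k * n + ii : Nat) : Int) := by
      rw [hdz, hi]; push_cast; ring
    have c2 : (0 + (k : Int)) * dimZ + i + 1 = ((k * n + ii + 1 : Nat) : Int) := by
      rw [hdz, hi]; push_cast; ring
    rw [c2, c1, PySem.List.pySetD_natCast, PySem.List.pySetD_natCast]
  rw [hstep, pv_zloop n ii h m m le_rfl]
  have hd2 : (dimZ - i - 2).toNat = n - ii - 2 := by omega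
  rw [hd2]
  simp [PySem.List.pyRepeat, List.append_assoc, ← hm]

theorem pv_xrow (dimX dimZ i : Int) (h0 : 0 ≤ i) (h1 : i < dimX - 1) :
    (PySem.List.pyRange 0 dimZ 1).foldl
      (fun s j => PySem.List.pySetD (PySem.List.pySetD s (j + i * dimZ) 'X') (j + (i + 1) * dimZ) 'X')
      (PySem.List.pyRepeat (List.replicate dimX.toNat '_') dimZ)
    = List.replicate (dimZ * i).toNat '_' ++ List.replicate (2 * dimZ).toNat 'X'
        ++ List.replicate (dimZ * (dimX - i - 2)).toNat '_' := by
  set n := dimZ.toNat with hn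
  set ii := i.toNat with hii
  set m := dimX.toNat with hm
  have hi : i = (ii : Int) := by omega
  have h : ii + 2 ≤ m := by omega
  rw [PySem.List.pyRange_one]
  have hr : (dimZ - 0).toNat = n := by omega
  rw [hr]
  rcases le_or_gt 0 dimZ with hz | hz
  · -- dimZ ≥ 0
    have hdz : dimZ = (n : Int) := by omega
    obtain ⟨t, ht⟩ : ∃ t, m = ii + 2 + t := ⟨m - ii - 2, by omega⟩
    have htt : m - ii - 2 = t := by omega
    rw [List.foldl_map]
    have hinit : PySem.List.pyRepeat (List.replicate m '_') dimZ
        = List.replicate (ii * n) '_' ++ (List.replicate n '_' ++ (List.replicate n '_' ++ List.replicate ((m - ii - 2) * n) '_')) := by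
      rw [show PySem.List.pyRepeat (List.replicate m '_') dimZ
            = (List.replicate n (List.replicate m '_')).flatten from rfl, pv_rep_rep]
      rw [← List.replicate_add, ← List.replicate_add, ← List.replicate_add]
      congr 1
      rw [htt, ht]
      ring
    rw [hinit]
    have hx := pv_xloop (List.replicate (ii * n) '_') (List.replicate ((m - ii - 2) * n) '_') n n le_rfl
    simp only [List.length_replicate, Nat.sub_self, List.replicate_zero, List.nil_append] at hx
    have hstep : (fun (s : List Char) (k : Nat) =>
          PySem.List.pySetD (PySem.List.pySetD s ((0 + (k : Int)) + i * dimZ) 'X') ((0 + (k : Int)) + (i + 1) * dimZ) 'X')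
        = (fun (s : List Char) (k : Nat) => (s.set (k + ii * n) 'X').set (k + (ii * n + n)) 'X') := by
      funext s k
      have c1 : (0 + (k : Int)) + i * dimZ = ((k + ii * n : Nat) : Int) := by
        rw [hi, hdz]; push_cast; ring
      have c2 : (0 + (k : Int)) + (i + 1) * dimZ = ((k + (ii * n + n) : Nat) : Int) := by
        rw [hi, hdz]; push_cast; ring
      rw [c2, c1, PySem.List.pySetD_natCast, PySem.List.pySetD_natCast]
    rw [hstep, hx]
    have a1 : (dimZ * i).toNat = ii * n := by
      rw [pv_toNat_mul dimZ i h0, ← hn, ← hii]; ring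
    have a2 : (2 * dimZ).toNat = n + n := by omega
    have a3 : (dimZ * (dimX - i - 2)).toNat = (m - ii - 2) * n := by
      rw [pv_toNat_mul dimZ (dimX - i - 2) (by omega), ← hn]
      have e : (dimX - i - 2).toNat = m - ii - 2 := by omega
      rw [e]; ring
    rw [a1, a2, a3, List.replicate_add, List.append_assoc, List.append_assoc]
  · -- dimZ < 0: empty inner range, everything degenerates to the empty string
    have hn0 : n = 0 := by omega
    have z1 : (dimZ * i).toNat = 0 := by
      have : dimZ * i ≤ 0 := mul_nonpos_of_nonpos_of_nonneg (by omega) h0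
      omega
    have z2 : (2 * dimZ).toNat = 0 := by omega
    have z3 : (dimZ * (dimX - i - 2)).toNat = 0 := by
      have : dimZ * (dimX - i - 2) ≤ 0 := mul_nonpos_of_nonpos_of_nonneg (by omega) (by omega)
      omega
    rw [hn0, z1, z2, z3,
      show PySem.List.pyRepeat (List.replicate m '_') dimZ
        = (List.replicate n (List.replicate m '_')).flatten from rfl, hn0]
    simp

-- ===== VERDICT (by name: the statement is the Claim_ definition above) =====
theorem bacon_shor_group_spec : Claim_equal_bacon_shor_group := by
  intro dimX dimZ _
  unfold Spec_bacon_shor_group bacon_shor_group bacon_shor_group_alt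
  simp only [PySem.List.foldl_append_singleton_eq_map, List.nil_append]
  refine congrArg₂ (fun a b => [a, b]) ?_ ?_
  · exact List.map_congr_left (fun i hi => by
      rcases PySem.List.mem_pyRange_one.mp hi with ⟨h0, h1⟩
      exact congrArg String.ofList (pv_xrow dimX dimZ i h0 h1))
  · exact List.map_congr_left (fun i hi => by
      rcases PySem.List.mem_pyRange_one.mp hi with ⟨h0, h1⟩
      exact congrArg String.ofList (pv_zrow dimX dimZ i h0 h1))
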